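-- pv_equiv track=rewrite | github.com/csalcedo001/goal-reducer | goal_reducer.py | remove_loops_idx
-- ===== SOURCE A (Python) =====
-- def remove_loops_idx(a):
--     clean_a = []
--     clean_a_ids = []
--
--     for aid, a_ele in enumerate(a):
--         if a_ele not in clean_a:
--             clean_a.append(a_ele)
--             clean_a_ids.append(aid)
--         else:
--             a_ele_idx = clean_a.index(a_ele)
--             clean_a = clean_a[:a_ele_idx + 1]
--
--             clean_a_ids = clean_a_ids[:a_ele_idx + 1]
--     return clean_a, clean_a_ids
-- ===== SOURCE B (Python) =====
-- def remove_loops_idx(a):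
--     clean_a = []
--     clean_a_ids = []
--     present = set()
--     for aid, a_ele in enumerate(a):
--         if a_ele not in present:
--             clean_a.append(a_ele)
--             clean_a_ids.append(aid)
--             present.add(a_ele)
--         else:
--             while clean_a[-1] != a_ele:
--                 present.discard(clean_a.pop())
--                 clean_a_ids.pop()
--     return clean_a, clean_a_ids
-- ===== Notes on version B (the rewrite author's own statement) =====
-- stated objective: faster
-- what changed: Replaces A's per-element list membership scan plus index+slice truncation by a stack discipline: a hash set gives O(1) membership tests, and a pop-until-match while loop removes elements one at a time from the top (amortized O(1) per input element) instead of computing clean_a.index and rebuilding both lists by slicing.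
import Mathlib
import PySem

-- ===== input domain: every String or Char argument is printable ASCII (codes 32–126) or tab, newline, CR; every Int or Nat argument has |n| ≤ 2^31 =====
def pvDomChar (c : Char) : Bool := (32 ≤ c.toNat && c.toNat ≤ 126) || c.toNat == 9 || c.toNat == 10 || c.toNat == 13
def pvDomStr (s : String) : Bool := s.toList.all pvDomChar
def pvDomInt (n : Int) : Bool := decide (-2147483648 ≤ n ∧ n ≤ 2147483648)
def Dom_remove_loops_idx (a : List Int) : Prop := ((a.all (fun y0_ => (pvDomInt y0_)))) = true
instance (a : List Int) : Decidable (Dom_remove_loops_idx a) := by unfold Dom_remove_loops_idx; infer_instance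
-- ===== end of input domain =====

-- B replaces A's repeated list-membership scan and `clean_a.index` + slice truncation by a stack
-- discipline: a set for membership and a pop-until-match loop (objective: faster, measured).

-- ===== PORT A =====
-- one loop iteration of A: state = (clean_a, clean_a_ids)
def stepA (st : List Int × List Int) (p : Int × Int) : List Int × List Int :=
  if p.2 ∉ st.1 then
    (st.1 ++ [p.2], st.2 ++ [p.1])
  else
    -- a_ele_idx = clean_a.index(a_ele); guarded by membership, so index? is some.
    match PySem.List.index? st.1 p.2 with
    | some i => (st.1.take (i + 1), st.2.take (i + 1))  -- xs[:i+1] with i+1 ≥ 0 is take (i+1)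
    | none => (st.1, st.2)  -- unreachable: p.2 ∈ st.1

def remove_loops_idx (a : List Int) : List Int × List Int :=
  (PySem.List.enumerate a 0).foldl stepA ([], [])

-- ===== PORT B =====
-- the while loop: pop clean_a/clean_a_ids and discard from `present` until clean_a[-1] == a_ele
def popUntil (x : Int) (ca ci : List Int) (s : PySem.Set Int) :
    List Int × List Int × PySem.Set Int :=
  match h : ca.getLast? with  -- clean_a[-1]  (PySem.List.pyGet? ca (-1) = ca.getLast?)
  | none => (ca, ci, s)       -- clean_a[-1] would raise IndexError; unreachable: x ∈ present ⊆ clean_a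
  | some y =>
    if y = x then (ca, ci, s)
    else popUntil x ca.dropLast ci.dropLast (PySem.Set.discard s y)
termination_by ca.length
decreasing_by
  have : ca ≠ [] := by intro hn; subst hn; simp at h
  simpa [List.length_dropLast] using Nat.sub_lt (List.length_pos_of_ne_nil this) Nat.one_pos

-- one loop iteration of B: state = (clean_a, clean_a_ids, present)
def stepB (st : List Int × List Int × PySem.Set Int) (p : Int × Int) :
    List Int × List Int × PySem.Set Int :=
  if ¬ PySem.Set.contains st.2.2 p.2 then
    (st.1 ++ [p.2], st.2.1 ++ [p.1], PySem.Set.add st.2.2 p.2)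
  else
    popUntil p.2 st.1 st.2.1 st.2.2

def remove_loops_idx_alt (a : List Int) : List Int × List Int :=
  let r := (PySem.List.enumerate a 0).foldl stepB ([], [], PySem.Set.empty)
  (r.1, r.2.1)

-- ===== PRECONDITION & SPEC =====
def Spec_remove_loops_idx (a : List Int) (out : List Int × List Int) : Prop := out = remove_loops_idx_alt a
instance (a : List Int) (out : List Int × List Int) : Decidable (Spec_remove_loops_idx a out) := by unfold Spec_remove_loops_idx; infer_instance

-- ===== CLAIM (what is proved, stated in full; the proofs are below) =====
def Claim_equal_remove_loops_idx : Prop := ∀ (a : List Int), Dom_remove_loops_idx a → Spec_remove_loops_idx a (remove_loops_idx a)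

-- ===== LEMMAS AND PROOFS =====

-- the pop-until-match loop, on a duplicate-free stack whose set is the stack itself,
-- computes exactly A's truncation at the first occurrence
lemma popUntil_eq (ca : List Int) (hnd : ca.Nodup) (x : Int) (i : Nat)
    (hidx : PySem.List.index? ca x = some i) (ci : List Int) (hlen : ca.length = ci.length) :
    popUntil x ca ci ca = (ca.take (i + 1), ci.take (i + 1), ca.take (i + 1)) := by
  induction ca using List.reverseRecOn generalizing i ci with
  | nil => simp [PySem.List.index?] at hidx
  | append_singleton cb y ih =>
    have hpair : y ∉ cb ∧ cb.Nodup := by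
      have h := hnd; simp [List.nodup_append] at h
      exact ⟨fun hc => h.2 y hc rfl, h.1⟩
    obtain ⟨hycb, hndcb⟩ := hpair
    rw [popUntil]
    split
    next heq => simp at heq
    next z heq =>
    obtain rfl : y = z := by simpa using heq
    by_cases hyx : y = x
    · subst hyx
      rw [PySem.List.index?_append_singleton_self (l := cb) (c := y) hycb] at hidx
      obtain rfl : cb.length = i := by injection hidx
      have h1 : (cb ++ [y]).take (cb.length + 1) = cb ++ [y] := by
        apply List.take_of_length_le; simp
      have h2 : ci.take (cb.length + 1) = ci := by
        apply List.take_of_length_le; simp at hlen; omega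
      simp [h1, h2]
    · have hxmem : x ∈ cb ++ [y] := by
        rw [← PySem.List.index?_isSome_iff, hidx]; rfl
      have hxcb : x ∈ cb := by
        rcases List.mem_append.mp hxmem with h | h
        · exact h
        · exact absurd (List.mem_singleton.mp h).symm hyx
      have hidxcb : PySem.List.index? cb x = some i := by
        rw [PySem.List.index?_append_of_mem [y] hxcb] at hidx; exact hidx
      have hi : i < cb.length := by
        obtain ⟨hk, -, -⟩ := PySem.List.getElem_of_index?_eq_some hidxcb; exact hk
      have hdisc : PySem.Set.discard (cb ++ [y]) y = cb := by
        simp [PySem.Set.discard]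
        exact fun a ha hay => hycb (hay ▸ ha)
      have hdl : (cb ++ [y]).dropLast = cb := by simp
      have hlen' : cb.length = ci.dropLast.length := by simp at hlen ⊢; omega
      have hif : ¬ (y = x) := hyx
      simp only [hif, if_false, hdl, hdisc]
      rw [ih hndcb i hidxcb ci.dropLast hlen']
      have h1 : (cb ++ [y]).take (i + 1) = cb.take (i + 1) := by
        rw [List.take_append_of_le_length (by omega)]
      have h2 : ci.dropLast.take (i + 1) = ci.take (i + 1) := by
        rw [List.dropLast_eq_take, List.take_take]
        congr 1
        simp at hlen
        omega
      rw [h1, h2]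

-- invariant transfer for one step
lemma step_agree (ca ci : List Int) (hnd : ca.Nodup) (hlen : ca.length = ci.length)
    (p : Int × Int) :
    stepB (ca, ci, ca) p = ((stepA (ca, ci) p).1, (stepA (ca, ci) p).2, (stepA (ca, ci) p).1)
    ∧ (stepA (ca, ci) p).1.Nodup ∧ (stepA (ca, ci) p).1.length = (stepA (ca, ci) p).2.length := by
  obtain ⟨aid, x⟩ := p
  by_cases hx : x ∈ ca
  · obtain ⟨i, hidx⟩ : ∃ i, PySem.List.index? ca x = some i := by
      have := PySem.List.index?_isSome_iff (xs := ca) (v := x)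
      rcases h : PySem.List.index? ca x with - | i
      · rw [h] at this; simp [hx] at this
      · exact ⟨i, rfl⟩
    have hcont : PySem.Set.contains ca x = true := by simp [PySem.Set.contains, hx]
    have hi : i < ca.length := by
      obtain ⟨hk, -, -⟩ := PySem.List.getElem_of_index?_eq_some hidx; exact hk
    have hA : stepA (ca, ci) (aid, x) = (ca.take (i + 1), ci.take (i + 1)) := by
      have hidx' := hidx
      rw [PySem.List.index?_eq_idxOf?] at hidx'
      simp [stepA, hx, hidx']
    refine ⟨?_, ?_, ?_⟩
    · simp only [stepB, hcont, not_true, if_false, hA]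
      exact popUntil_eq ca hnd x i hidx ci hlen
    · rw [hA]; exact hnd.sublist (List.take_sublist _ _)
    · rw [hA]; simp; omega
  · have hcont : PySem.Set.contains ca x = false := by simp [PySem.Set.contains, hx]
    have hA : stepA (ca, ci) (aid, x) = (ca ++ [x], ci ++ [aid]) := by
      simp [stepA, hx]
    refine ⟨?_, ?_, ?_⟩
    · simp only [stepB, hcont, Bool.false_eq_true, not_false_iff, if_true, hA]
      simp [PySem.Set.add, PySem.Set.contains, hx]
    · rw [hA]
      simp [List.nodup_append, hnd]
      exact fun a ha hax => hx (hax ▸ ha)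
    · rw [hA]; simp [hlen]

lemma fold_agree (l : List (Int × Int)) (ca ci : List Int)
    (hnd : ca.Nodup) (hlen : ca.length = ci.length) :
    l.foldl stepB (ca, ci, ca)
      = ((l.foldl stepA (ca, ci)).1, (l.foldl stepA (ca, ci)).2, (l.foldl stepA (ca, ci)).1) ∧
    (l.foldl stepA (ca, ci)).1.Nodup ∧
    (l.foldl stepA (ca, ci)).1.length = (l.foldl stepA (ca, ci)).2.length := by
  induction l generalizing ca ci with
  | nil => exact ⟨rfl, hnd, hlen⟩
  | cons p l ih =>
    obtain ⟨hB, hnd', hlen'⟩ := step_agree ca ci hnd hlen p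
    simpa [List.foldl_cons, hB] using ih (stepA (ca, ci) p).1 (stepA (ca, ci) p).2 hnd' hlen'

-- ===== VERDICT (by name: the statement is the Claim_ definition above) =====
theorem remove_loops_idx_spec : Claim_equal_remove_loops_idx := by
  intro a _
  unfold Spec_remove_loops_idx remove_loops_idx remove_loops_idx_alt
  have h := (fold_agree (PySem.List.enumerate a 0) [] [] (by simp) rfl).1
  simp only [PySem.Set.empty] at h ⊢
  rw [h]
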